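-- pv_equiv track=rewrite | github.com/Thilec02/Ngram | Ngram.py | tuple_Ngram
-- ===== SOURCE A (Python) =====
-- def tuple_Ngram(n, liste_mots):
--     """
--     Crée des tuples avec les indices de liste_mots
--     :param n: Taille du tuple
--     :param liste_mots: liste des mots dans la phrase
--     :return: liste de tuple pour le focus en position 0 et liste de tuple pour le focus en position n
--     """
--     liste_ngramav = []
--     liste_ngramar = []
--
--     for i in range(len(liste_mots) - (n-1)):
--         groupeav = ()
--         groupear = ()
--         for j in range(n):
--             groupeav += i+j,
--             groupear += len(liste_mots) - (i + j) - 1,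
--         liste_ngramav.append(groupeav)
--         liste_ngramar.append(groupear)
--
--     return liste_ngramav, liste_ngramar
-- ===== SOURCE B (Python) =====
-- def tuple_Ngram(n, liste_mots):
--     # Column-wise (transposed) construction: column j holds the j-th index of
--     # every window; zip transposes the columns into the window tuples.
--     m = len(liste_mots) - (n - 1)
--     if m <= 0:
--         return [], []
--     cols = [range(j, j + m) for j in range(n)]
--     av = list(zip(*cols))
--     last = len(liste_mots) - 1
--     ar = [tuple(last - x for x in row) for row in av]
--     return av, ar
-- ===== Notes on version B (the rewrite author's own statement) =====
-- stated objective: alternative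
-- what changed: Replaces A's row-by-row nested loops (growing each tuple by repeated concatenation) with a column-wise construction: one range per tuple position, transposed into the window tuples by zip, with the backward tuples then mirrored from the rows.
-- intended difference: For n <= 0 A returns len(liste_mots)+1-n copies of the empty tuple in each list (its inner loop runs zero times but the outer loop still runs), while B returns ([], []); an n-gram size of zero or less should yield no n-grams, so B's empty result is the intended value. — e.g. on tuple_Ngram(0, ["a"]): A returns ([[], []], [[], []]), B returns ([], [])
import Mathlib
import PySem

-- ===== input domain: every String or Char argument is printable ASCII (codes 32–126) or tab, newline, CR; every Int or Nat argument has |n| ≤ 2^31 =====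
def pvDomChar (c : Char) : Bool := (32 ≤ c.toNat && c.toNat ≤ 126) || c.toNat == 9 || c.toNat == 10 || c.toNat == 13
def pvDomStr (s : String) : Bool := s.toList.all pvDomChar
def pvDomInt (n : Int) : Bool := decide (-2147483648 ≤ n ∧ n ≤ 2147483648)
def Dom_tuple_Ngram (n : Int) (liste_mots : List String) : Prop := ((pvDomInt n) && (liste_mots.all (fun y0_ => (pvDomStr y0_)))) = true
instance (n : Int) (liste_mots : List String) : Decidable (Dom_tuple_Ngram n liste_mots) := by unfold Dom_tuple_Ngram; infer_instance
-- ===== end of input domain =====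

-- B builds the n-grams column-wise (one range per tuple position, transposed by zip)
-- instead of A's row-by-row nested accumulating loops; for n ≤ 0 B returns ([], [])
-- where A returns lists of empty tuples (see D_ below).

-- ===== PORT A =====
def tuple_Ngram (n : Int) (liste_mots : List String) : List (List Int) × List (List Int) :=
  (PySem.List.pyRange 0 ((liste_mots.length : Int) - (n - 1)) 1).foldl
    (fun (acc : List (List Int) × List (List Int)) i =>
      let g := (PySem.List.pyRange 0 n 1).foldl
        (fun (g : List Int × List Int) j =>
          (g.1 ++ [i + j], g.2 ++ [(liste_mots.length : Int) - (i + j) - 1])) ([], [])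
      (acc.1 ++ [g.1], acc.2 ++ [g.2]))
    ([], [])

-- ===== PORT B =====
-- zip(*cols): take the heads of all columns as a row, recurse on the tails,
-- stopping when some column is exhausted (Python's zip truncates at the shortest).
def pyZipAux : Nat → List (List Int) → List (List Int)
  | 0, _ => []
  | Nat.succ k, cols =>
    if cols.all (fun c => !c.isEmpty) then
      cols.map (fun c => c.headD 0) :: pyZipAux k (cols.map (fun c => c.tail))
    else []

-- zip() of no iterables is empty; otherwise the first column's length bounds the rows.
def pyZip (cols : List (List Int)) : List (List Int) :=
  match cols with
  | [] => []
  | c :: cs => pyZipAux c.length (c :: cs)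

def tuple_Ngram_alt (n : Int) (liste_mots : List String) : List (List Int) × List (List Int) :=
  let m : Int := (liste_mots.length : Int) - (n - 1)
  if m ≤ 0 then ([], []) else
  let cols := (PySem.List.pyRange 0 n 1).map (fun j => PySem.List.pyRange j (j + m) 1)
  let av := pyZip cols
  let last : Int := (liste_mots.length : Int) - 1
  (av, av.map (fun row => row.map (fun x => last - x)))

-- ===== PRECONDITION & SPEC =====
-- For n ≤ 0 A returns len+1-n copies of the empty tuple in each list (its inner loop
-- runs zero times but its outer loop still runs), while B returns ([], []); a window
-- size of zero or less should yield no n-grams, so B's empty result is the intended value.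
def D_tuple_Ngram (n : Int) (liste_mots : List String) : Prop := n ≤ 0
instance (n : Int) (liste_mots : List String) : Decidable (D_tuple_Ngram n liste_mots) := by unfold D_tuple_Ngram; infer_instance

def Spec_tuple_Ngram (n : Int) (liste_mots : List String) (out : List (List Int) × List (List Int)) : Prop := ¬ D_tuple_Ngram n liste_mots → out = tuple_Ngram_alt n liste_mots
instance (n : Int) (liste_mots : List String) (out : List (List Int) × List (List Int)) : Decidable (Spec_tuple_Ngram n liste_mots out) := by unfold Spec_tuple_Ngram; infer_instance

def pvDiffWitness_tuple_Ngram : Int × List String := (0, ["a"])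
def pvDiffWitnessOut_tuple_Ngram : (List (List Int) × List (List Int)) × (List (List Int) × List (List Int)) :=
  (([[], []], [[], []]), ([], []))

-- ===== CLAIM (what is proved, stated in full; the proofs are below) =====
def Claim_unchanged_tuple_Ngram : Prop := ∀ (n : Int) (liste_mots : List String), Dom_tuple_Ngram n liste_mots → Spec_tuple_Ngram n liste_mots (tuple_Ngram n liste_mots)
def Claim_changed_tuple_Ngram : Prop := Dom_tuple_Ngram (pvDiffWitness_tuple_Ngram.1) (pvDiffWitness_tuple_Ngram.2) ∧ D_tuple_Ngram (pvDiffWitness_tuple_Ngram.1) (pvDiffWitness_tuple_Ngram.2) ∧ tuple_Ngram (pvDiffWitness_tuple_Ngram.1) (pvDiffWitness_tuple_Ngram.2) = pvDiffWitnessOut_tuple_Ngram.1 ∧ tuple_Ngram_alt (pvDiffWitness_tuple_Ngram.1) (pvDiffWitness_tuple_Ngram.2) = pvDiffWitnessOut_tuple_Ngram.2 ∧ pvDiffWitnessOut_tuple_Ngram.1 ≠ pvDiffWitnessOut_tuple_Ngram.2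
def Claim_exact_tuple_Ngram : Prop := ∀ (n : Int) (liste_mots : List String), Dom_tuple_Ngram n liste_mots → D_tuple_Ngram n liste_mots → tuple_Ngram n liste_mots ≠ tuple_Ngram_alt n liste_mots

-- ===== LEMMAS AND PROOFS =====

-- a foldl that appends one element to each component is the pair of maps
theorem foldl_append_pair {α β γ : Type} (xs : List α) (f : α → β) (g : α → γ)
    (a : List β) (b : List γ) :
    xs.foldl (fun acc x => (acc.1 ++ [f x], acc.2 ++ [g x])) (a, b)
      = (a ++ xs.map f, b ++ xs.map g) := by
  induction xs generalizing a b with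
  | nil => simp
  | cons x xs ih => simp [List.foldl, ih]

-- zip of nonempty list of equal-length columns is the transpose
theorem pyZipAux_transpose (m : Nat) (cols : List (List Int)) (hne : cols ≠ [])
    (hlen : ∀ c ∈ cols, c.length = m) :
    pyZipAux m cols = (List.range m).map (fun i => cols.map (fun c => c.getD i 0)) := by
  induction m generalizing cols with
  | zero => simp [pyZipAux]
  | succ k ih =>
    have hall : cols.all (fun c => !c.isEmpty) = true := by
      rw [List.all_eq_true]; intro c hc
      have := hlen c hc
      cases c with
      | nil => simp at this
      | cons x xs => simp [List.isEmpty]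
    rw [pyZipAux, if_pos hall]
    have htails : ∀ c ∈ cols.map (fun c => c.tail), c.length = k := by
      intro c hc
      rcases List.mem_map.mp hc with ⟨d, hd, rfl⟩
      have := hlen d hd
      cases d with
      | nil => simp at this
      | cons x xs => simpa using this
    have hne' : cols.map (fun c => c.tail) ≠ [] := by
      cases cols with
      | nil => exact absurd rfl hne
      | cons c cs => simp
    rw [ih _ hne' htails, List.range_succ_eq_map]
    simp only [List.map_cons, List.map_map]
    congr 1
    · apply List.map_congr_left; intro c hc
      have := hlen c hc
      cases c with
      | nil => simp at this
      | cons x xs => simp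
    · apply List.map_congr_left; intro i _
      simp only [Function.comp_apply]
      apply List.map_congr_left; intro c hc
      have := hlen c hc
      cases c with
      | nil => simp at this
      | cons x xs => simp

-- characterisation of A as a pair of row maps
theorem tuple_Ngram_eq_rows (n : Int) (L : List String) :
    tuple_Ngram n L =
      ((PySem.List.pyRange 0 ((L.length : Int) - (n - 1)) 1).map
          (fun i => (PySem.List.pyRange 0 n 1).map (fun j => i + j)),
       (PySem.List.pyRange 0 ((L.length : Int) - (n - 1)) 1).map
          (fun i => (PySem.List.pyRange 0 n 1).map (fun j => (L.length : Int) - (i + j) - 1))) := by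
  unfold tuple_Ngram
  simp only [foldl_append_pair, List.nil_append]

-- the columns of B all have length m.toNat
theorem col_length (n m : Int) (c : List Int)
    (hc : c ∈ (PySem.List.pyRange 0 n 1).map (fun j => PySem.List.pyRange j (j + m) 1)) :
    c.length = m.toNat := by
  rcases List.mem_map.mp hc with ⟨j, _, rfl⟩
  rw [PySem.List.length_pyRange_one]
  congr 1; omega

theorem tuple_Ngram_spec' (n : Int) (L : List String) (hn : 0 < n) :
    tuple_Ngram n L = tuple_Ngram_alt n L := by
  rw [tuple_Ngram_eq_rows]
  unfold tuple_Ngram_alt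
  by_cases hm0 : (L.length : Int) - (n - 1) ≤ 0
  · have hnil : PySem.List.pyRange 0 ((L.length : Int) - (n - 1)) 1 = [] :=
      PySem.List.pyRange_one_eq_nil (by omega)
    rw [if_pos hm0, hnil]
    simp
  rw [if_neg hm0]
  set m : Int := (L.length : Int) - (n - 1) with hm
  set cols := (PySem.List.pyRange 0 n 1).map (fun j => PySem.List.pyRange j (j + m) 1) with hcols
  have hcne : cols ≠ [] := by
    rw [hcols]
    simp only [ne_eq, List.map_eq_nil_iff]
    rw [PySem.List.pyRange_one]
    intro h
    simp only [List.map_eq_nil_iff, List.range_eq_nil] at h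
    omega
  have hclen : ∀ c ∈ cols, c.length = m.toNat := fun c hc => col_length n m c hc
  have hzip : pyZip cols
      = (List.range m.toNat).map (fun i => cols.map (fun c => c.getD i 0)) := by
    obtain ⟨c, cs, hc⟩ : ∃ c cs, cols = c :: cs := by
      cases hx : cols with
      | nil => exact absurd hx hcne
      | cons c cs => exact ⟨c, cs, rfl⟩
    have hcl : c.length = m.toNat := hclen c (hc ▸ List.mem_cons_self)
    rw [hc]
    show pyZipAux c.length (c :: cs) = _
    rw [hcl, pyZipAux_transpose m.toNat (c :: cs) (by simp) (hc ▸ hclen), ← hc]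
  have hrow : ∀ i : Nat, i < m.toNat →
      cols.map (fun c => c.getD i 0) = (PySem.List.pyRange 0 n 1).map (fun j => (i : Int) + j) := by
    intro i hi
    rw [hcols, List.map_map]
    apply List.map_congr_left
    intro j hj
    have hj' := (PySem.List.mem_pyRange_one).mp hj
    simp only [Function.comp_apply]
    have hlen : i < (PySem.List.pyRange j (j + m) 1).length := by
      rw [PySem.List.length_pyRange_one]; omega
    have hget : (PySem.List.pyRange j (j + m) 1)[i]'hlen = j + i :=
      PySem.List.getElem_pyRange_one _ _ _ _
    rw [List.getD_eq_getElem _ _ hlen, hget]; ring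
  have hA1 : PySem.List.pyRange 0 m 1 = (List.range m.toNat).map (fun k : Nat => (k : Int)) := by
    rw [PySem.List.pyRange_one]
    simp only [Int.sub_zero]
    exact List.map_congr_left (fun a _ => zero_add (a : Int))
  have hav : pyZip cols
      = (PySem.List.pyRange 0 m 1).map
          (fun i => (PySem.List.pyRange 0 n 1).map (fun j => i + j)) := by
    rw [hzip, hA1, List.map_map]
    apply List.map_congr_left
    intro k hk
    exact hrow k (List.mem_range.mp hk)
  refine Prod.ext ?_ ?_
  · simpa using hav.symm
  · show (PySem.List.pyRange 0 m 1).map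
        (fun i => (PySem.List.pyRange 0 n 1).map (fun j => (L.length : Int) - (i + j) - 1))
      = (pyZip cols).map (fun row => row.map (fun x => (L.length : Int) - 1 - x))
    rw [hav, List.map_map]
    apply List.map_congr_left; intro i _
    simp only [Function.comp_apply, List.map_map]
    apply List.map_congr_left; intro j _
    simp only [Function.comp_apply]; ring

-- lengths of the two sides inside D_
theorem tuple_Ngram_alt_nil (n : Int) (L : List String) (hn : n ≤ 0) :
    tuple_Ngram_alt n L = ([], []) := by
  unfold tuple_Ngram_alt
  have h : PySem.List.pyRange 0 n 1 = [] := PySem.List.pyRange_one_eq_nil (by omega)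
  have hm0 : ¬ ((L.length : Int) - (n - 1) ≤ 0) := by omega
  rw [if_neg hm0]
  simp [h, pyZip]

-- ===== VERDICT (by name: the statements are the Claim_ definitions above) =====
theorem tuple_Ngram_spec : Claim_unchanged_tuple_Ngram := by
  intro n L _ hD
  have hn : 0 < n := by unfold D_tuple_Ngram at hD; omega
  exact tuple_Ngram_spec' n L hn

theorem tuple_Ngram_changed : Claim_changed_tuple_Ngram := by
  unfold Claim_changed_tuple_Ngram; decide

theorem tuple_Ngram_tight : Claim_exact_tuple_Ngram := by
  intro n L _ hD
  unfold D_tuple_Ngram at hD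
  rw [tuple_Ngram_alt_nil n L hD, tuple_Ngram_eq_rows]
  intro h
  have h1 := congrArg (fun p => p.1.length) h
  simp only [List.length_map, List.length_nil] at h1
  rw [PySem.List.length_pyRange_one] at h1
  omega
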